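-- pv_equiv track=rewrite | github.com/leejaeyeong/Linear-Argebra | 5_3.py | convert_front_one
-- ===== SOURCE A (Python) =====
-- def convert_front_one(mat) :
--     for i in range(len(mat)) :
--         divide = 0
--         state = False
--         for j in range(len(mat[i])) :
--             if state == False :
--                 if mat[i][j] != 0 and mat[i][j] != 1 :
--                     if divide == 0 :
--                         divide = mat[i][j]
--                         mat[i][j] = int(mat[i][j] / divide)
--                         state = True
--                 elif  mat[i][j] == 1 :
--                     break
--             else :
--                 mat[i][j] = int(mat[i][j] / divide)
--
--     return mat
-- ===== SOURCE B (Python) =====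
-- def convert_front_one(mat):
--     # Structural recursion per row (no indices, no flags): a row headed by 0
--     # keeps the 0 and recurses on the tail; a row headed by 1 is left as is;
--     # any other head x rescales the WHOLE remaining row uniformly by int(y/x)
--     # (which makes the head itself 1). Builds a new matrix; A mutates in place,
--     # so only the return value is matched.
--     def fix(row):
--         if not row:
--             return []
--         x = row[0]
--         if x == 0:
--             return [0] + fix(row[1:])
--         if x == 1:
--             return list(row)
--         return [int(y / x) for y in row]
--     return [fix(r) for r in mat]
-- ===== Notes on version B (the rewrite author's own statement) =====
-- stated objective: alternative
-- what changed: Replaces A's in-place index loop with divide/state flags by a purely functional structural recursion on each row: a leading 0 is kept and the tail recursed, a leading 1 returns the row unchanged, and any other head x rescales the entire remaining row uniformly with int(y/x) (no pivot bookkeeping, no flags, builds a new matrix instead of mutating).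
import Mathlib
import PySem

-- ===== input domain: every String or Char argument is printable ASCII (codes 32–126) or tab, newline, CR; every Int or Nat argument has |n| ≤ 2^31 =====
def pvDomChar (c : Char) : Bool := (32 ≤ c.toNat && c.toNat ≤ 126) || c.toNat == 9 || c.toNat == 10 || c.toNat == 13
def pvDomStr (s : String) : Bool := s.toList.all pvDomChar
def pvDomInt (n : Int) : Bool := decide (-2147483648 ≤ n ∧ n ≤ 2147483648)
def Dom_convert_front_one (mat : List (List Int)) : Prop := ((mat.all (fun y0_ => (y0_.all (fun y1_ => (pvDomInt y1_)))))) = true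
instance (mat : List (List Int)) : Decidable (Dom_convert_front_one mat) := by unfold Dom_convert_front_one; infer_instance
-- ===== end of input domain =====

-- ===== PORT A =====
-- B replaces A's in-place flag-driven index loop by a structural recursion per row (objective: alternative);
-- A mutates mat in place, B builds a new matrix: the equivalence is about the return value.
-- int(x/divide): on Dom (|entries| ≤ 2^31) Python's float division followed by int() equals exact
-- truncation toward zero, ported as Int.tdiv (exact on the stated domain).
def pvRowA (divide : Int) (state : Bool) : List Int → List Int
  | [] => []
  | x :: xs =>
    if state = false then
      if x ≠ 0 ∧ x ≠ 1 then
        if divide = 0 then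
          Int.tdiv x x :: pvRowA x true xs
        else
          x :: pvRowA divide false xs
      else if x = 1 then
        x :: xs  -- break: the rest of the row is left unchanged
      else
        x :: pvRowA divide false xs
    else
      Int.tdiv x divide :: pvRowA divide true xs

def convert_front_one (mat : List (List Int)) : List (List Int) :=
  mat.map (pvRowA 0 false)

-- ===== PORT B =====
def pvFix : List Int → List Int
  | [] => []
  | x :: xs =>
    if x = 0 then 0 :: pvFix xs
    else if x = 1 then x :: xs
    else (x :: xs).map (fun y => Int.tdiv y x)

def convert_front_one_alt (mat : List (List Int)) : List (List Int) :=
  mat.map pvFix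

-- ===== PRECONDITION & SPEC =====
def Spec_convert_front_one (mat : List (List Int)) (out : List (List Int)) : Prop := out = convert_front_one_alt mat
instance (mat : List (List Int)) (out : List (List Int)) : Decidable (Spec_convert_front_one mat out) := by unfold Spec_convert_front_one; infer_instance

-- ===== CLAIM (what is proved, stated in full; the proofs are below) =====
def Claim_equal_convert_front_one : Prop := ∀ (mat : List (List Int)), Dom_convert_front_one mat → Spec_convert_front_one mat (convert_front_one mat)

-- ===== LEMMAS AND PROOFS =====
theorem pvRowA_true (d : Int) (xs : List Int) :
    pvRowA d true xs = xs.map (fun x => Int.tdiv x d) := by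
  induction xs with
  | nil => rfl
  | cons x xs ih => simp [pvRowA, ih]

theorem pvRow_eq (row : List Int) : pvRowA 0 false row = pvFix row := by
  induction row with
  | nil => rfl
  | cons x xs ih =>
    by_cases hx0 : x = 0
    · subst hx0
      simp [pvRowA, pvFix, ih]
    · by_cases hx1 : x = 1
      · subst hx1
        simp [pvRowA, pvFix]
      · simp [pvRowA, pvFix, hx0, hx1, pvRowA_true]

-- ===== VERDICT (by name: the statement is the Claim_ definition above) =====
theorem convert_front_one_spec : Claim_equal_convert_front_one := by
  intro mat _
  unfold Spec_convert_front_one convert_front_one convert_front_one_alt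
  exact List.map_congr_left (fun row _ => pvRow_eq row)
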